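-- pv_equiv track=rewrite | github.com/bjosor/mapgenerator | main.py | check_neighbor
-- ===== SOURCE A (Python) =====
-- def check_neighbor(array,x,y,tile):
--     binary = 0
--     neighbors = [array[x+1][y],array[x][y+1],array[x-1][y],array[x][y-1]]
--     for a in neighbors:
--         if a == tile:
--             index = neighbors.index(a)
--             if index == 0:
--                 binary += 1
--             elif index == 1:
--                 binary += 2
--             elif index == 2:
--                 binary += 4
--             elif index == 3:
--                 binary += 8
--     return binary
-- ===== SOURCE B (Python) =====
-- def check_neighbor(array, x, y, tile):
--     neighbors = [array[x+1][y], array[x][y+1], array[x-1][y], array[x][y-1]]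
--     return sum(2 ** i for i, a in enumerate(neighbors) if a == tile)
-- ===== Notes on version B (the rewrite author's own statement) =====
-- stated objective: simpler
-- what changed: Replaces the loop that re-looks-up each neighbor with .index (an if/elif bit chain) by a single enumerate-based sum of 2**i over matching positions, which also fixes the bug that duplicate matching neighbors all contribute the first match's bit.
-- intended difference: On inputs where two or more of the four neighbors equal tile, A returns count*2^(first match index) because .index always finds the first occurrence (e.g. all four equal gives 4), while B returns the intended bitmask with one distinct bit per matching direction (15 there); B's value is the intended one since the function builds a 4-bit neighbor mask. — e.g. on check_neighbor([[5, 5], [5, 5]], 0, 0, 5): A returns 4, B returns 15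
import Mathlib
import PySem

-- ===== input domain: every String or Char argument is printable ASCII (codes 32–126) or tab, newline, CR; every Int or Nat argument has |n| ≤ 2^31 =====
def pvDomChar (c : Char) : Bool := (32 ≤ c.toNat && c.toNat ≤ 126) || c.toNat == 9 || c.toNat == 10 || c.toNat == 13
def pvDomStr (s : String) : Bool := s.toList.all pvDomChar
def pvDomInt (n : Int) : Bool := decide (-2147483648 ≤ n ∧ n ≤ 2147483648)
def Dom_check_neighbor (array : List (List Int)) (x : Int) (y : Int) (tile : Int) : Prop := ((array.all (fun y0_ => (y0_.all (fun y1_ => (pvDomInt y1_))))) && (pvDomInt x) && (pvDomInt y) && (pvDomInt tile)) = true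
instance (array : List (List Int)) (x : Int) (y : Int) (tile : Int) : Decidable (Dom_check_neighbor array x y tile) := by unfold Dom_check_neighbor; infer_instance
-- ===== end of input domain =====

-- B replaces A's .index-based if/elif bit chain by a single enumerate sum of 2**i over
-- matching neighbor positions; B intentionally fixes A's duplicate-neighbor bug (see D_ below).


-- ===== PORT A =====
def check_neighbor (array : List (List Int)) (x : Int) (y : Int) (tile : Int) : Int :=
  match (PySem.List.pyGet? array (x+1)).bind (fun r => PySem.List.pyGet? r y),
        (PySem.List.pyGet? array x).bind (fun r => PySem.List.pyGet? r (y+1)),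
        (PySem.List.pyGet? array (x-1)).bind (fun r => PySem.List.pyGet? r y),
        (PySem.List.pyGet? array x).bind (fun r => PySem.List.pyGet? r (y-1)) with
  | some n0, some n1, some n2, some n3 =>
      let neighbors : List Int := [n0, n1, n2, n3]
      neighbors.foldl (fun binary a =>
        if a == tile then
          match PySem.List.index? neighbors a with
          | some 0 => binary + 1
          | some 1 => binary + 2
          | some 2 => binary + 4
          | some 3 => binary + 8
          | _ => binary
        else binary) 0
  | _, _, _, _ => 0   -- IndexError: excluded by Pre_check_neighbor

-- ===== PORT B =====
def check_neighbor_alt (array : List (List Int)) (x : Int) (y : Int) (tile : Int) : Int :=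
  (((PySem.List.pyGet? array (x+1)).bind (fun r => PySem.List.pyGet? r y)).bind (fun n0 =>
   ((PySem.List.pyGet? array x).bind (fun r => PySem.List.pyGet? r (y+1))).bind (fun n1 =>
   ((PySem.List.pyGet? array (x-1)).bind (fun r => PySem.List.pyGet? r y)).bind (fun n2 =>
   ((PySem.List.pyGet? array x).bind (fun r => PySem.List.pyGet? r (y-1))).map (fun n3 =>
     (PySem.List.enumerate [n0, n1, n2, n3]).foldl
       (fun s p => if p.2 == tile then s + 2 ^ p.1.toNat else s) 0))))).getD 0
  -- .getD 0 is never used under Pre_check_neighbor (an out-of-range access is an IndexError)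

-- ===== PRECONDITION & SPEC =====
-- Pre_ excludes exactly the inputs where one of the four neighbor accesses raises IndexError.
def Pre_check_neighbor (array : List (List Int)) (x : Int) (y : Int) (tile : Int) : Prop :=
  PySem.Raise.InRange array.length (x+1) ∧
  PySem.Raise.InRange array.length x ∧
  PySem.Raise.InRange array.length (x-1) ∧
  PySem.Raise.InRange (PySem.List.pyGetD array (x+1) []).length y ∧
  PySem.Raise.InRange (PySem.List.pyGetD array x []).length (y+1) ∧
  PySem.Raise.InRange (PySem.List.pyGetD array (x-1) []).length y ∧
  PySem.Raise.InRange (PySem.List.pyGetD array x []).length (y-1)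
instance (array : List (List Int)) (x : Int) (y : Int) (tile : Int) : Decidable (Pre_check_neighbor array x y tile) := by unfold Pre_check_neighbor; infer_instance

def pvWitness_check_neighbor : List (List Int) × Int × Int × Int := ([[1, 2], [3, 4]], 0, 0, 3)

-- On inputs where two or more of the four neighbors equal tile, A returns count*2^(first match
-- index) because .index always finds the first occurrence, while B returns the intended bitmask
-- with one distinct bit per matching direction; B's value is the intended 4-bit neighbor mask.
def D_check_neighbor (array : List (List Int)) (x : Int) (y : Int) (tile : Int) : Prop :=
  2 ≤ ([PySem.List.pyGetD (PySem.List.pyGetD array (x+1) []) y 0,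
        PySem.List.pyGetD (PySem.List.pyGetD array x []) (y+1) 0,
        PySem.List.pyGetD (PySem.List.pyGetD array (x-1) []) y 0,
        PySem.List.pyGetD (PySem.List.pyGetD array x []) (y-1) 0].count tile)
instance (array : List (List Int)) (x : Int) (y : Int) (tile : Int) : Decidable (D_check_neighbor array x y tile) := by unfold D_check_neighbor; infer_instance

def Spec_check_neighbor (array : List (List Int)) (x : Int) (y : Int) (tile : Int) (out : Int) : Prop := ¬ D_check_neighbor array x y tile → out = check_neighbor_alt array x y tile
instance (array : List (List Int)) (x : Int) (y : Int) (tile : Int) (out : Int) : Decidable (Spec_check_neighbor array x y tile out) := by unfold Spec_check_neighbor; infer_instance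

def pvDiffWitness_check_neighbor : List (List Int) × Int × Int × Int := ([[5, 5], [5, 5]], 0, 0, 5)
def pvDiffWitnessOut_check_neighbor : Int × Int := (4, 15)

-- ===== CLAIM (what is proved, stated in full; the proofs are below) =====
def Claim_unchanged_check_neighbor : Prop := ∀ (array : List (List Int)) (x : Int) (y : Int) (tile : Int), Dom_check_neighbor array x y tile → Pre_check_neighbor array x y tile → Spec_check_neighbor array x y tile (check_neighbor array x y tile)
def Claim_changed_check_neighbor : Prop := Dom_check_neighbor (pvDiffWitness_check_neighbor.1) (pvDiffWitness_check_neighbor.2.1) (pvDiffWitness_check_neighbor.2.2.1) (pvDiffWitness_check_neighbor.2.2.2) ∧ Pre_check_neighbor (pvDiffWitness_check_neighbor.1) (pvDiffWitness_check_neighbor.2.1) (pvDiffWitness_check_neighbor.2.2.1) (pvDiffWitness_check_neighbor.2.2.2) ∧ D_check_neighbor (pvDiffWitness_check_neighbor.1) (pvDiffWitness_check_neighbor.2.1) (pvDiffWitness_check_neighbor.2.2.1) (pvDiffWitness_check_neighbor.2.2.2) ∧ check_neighbor (pvDiffWitness_check_neighbor.1) (pvDiffWitness_check_neighbor.2.1)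 (pvDiffWitness_check_neighbor.2.2.1) (pvDiffWitness_check_neighbor.2.2.2) = pvDiffWitnessOut_check_neighbor.1 ∧ check_neighbor_alt (pvDiffWitness_check_neighbor.1) (pvDiffWitness_check_neighbor.2.1) (pvDiffWitness_check_neighbor.2.2.1) (pvDiffWitness_check_neighbor.2.2.2) = pvDiffWitnessOut_check_neighbor.2 ∧ pvDiffWitnessOut_check_neighbor.1 ≠ pvDiffWitnessOut_check_neighbor.2
def Claim_exact_check_neighbor : Prop := ∀ (array : List (List Int)) (x : Int) (y : Int) (tile : Int), Dom_check_neighbor array x y tile → Pre_check_neighbor array x y tile → D_check_neighbor array x y tile → check_neighbor array x y tile ≠ check_neighbor_alt array x y tile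

-- ===== LEMMAS AND PROOFS =====

lemma pyGet?_eq_some_getD {α : Type} (xs : List α) (i : Int) (d : α)
    (h : PySem.Raise.InRange xs.length i) :
    PySem.List.pyGet? xs i = some (PySem.List.pyGetD xs i d) := by
  cases hx : PySem.List.pyGet? xs i with
  | none => exact absurd ((PySem.List.pyGet?_eq_none_iff xs i).1 hx) (not_not_intro h)
  | some v => simp [PySem.List.pyGetD, hx]

lemma coreA (n0 n1 n2 n3 tile : Int) (h : ¬ 2 ≤ ([n0, n1, n2, n3].count tile)) :
    ([n0, n1, n2, n3].foldl (fun binary a =>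
        if a == tile then
          match PySem.List.index? [n0, n1, n2, n3] a with
          | some 0 => binary + 1
          | some 1 => binary + 2
          | some 2 => binary + 4
          | some 3 => binary + 8
          | _ => binary
        else binary) (0 : Int))
    = (PySem.List.enumerate [n0, n1, n2, n3]).foldl
        (fun s p => if p.2 == tile then s + 2 ^ p.1.toNat else s) (0 : Int) := by
  by_cases h0 : n0 = tile <;> by_cases h1 : n1 = tile <;> by_cases h2 : n2 = tile <;> by_cases h3 : n3 = tile <;>
    simp_all [List.foldl, PySem.List.enumerate_cons, PySem.List.enumerate_nil,
      PySem.List.index?_eq_idxOf?, List.idxOf?, List.findIdx?, List.findIdx?.go]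

lemma coreD (n0 n1 n2 n3 tile : Int) (h : 2 ≤ ([n0, n1, n2, n3].count tile)) :
    ([n0, n1, n2, n3].foldl (fun binary a =>
        if a == tile then
          match PySem.List.index? [n0, n1, n2, n3] a with
          | some 0 => binary + 1
          | some 1 => binary + 2
          | some 2 => binary + 4
          | some 3 => binary + 8
          | _ => binary
        else binary) (0 : Int))
    ≠ (PySem.List.enumerate [n0, n1, n2, n3]).foldl
        (fun s p => if p.2 == tile then s + 2 ^ p.1.toNat else s) (0 : Int) := by
  by_cases h0 : n0 = tile <;> by_cases h1 : n1 = tile <;> by_cases h2 : n2 = tile <;> by_cases h3 : n3 = tile <;>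
    simp_all [List.foldl, PySem.List.enumerate_cons, PySem.List.enumerate_nil,
      PySem.List.index?_eq_idxOf?, List.idxOf?, List.findIdx?, List.findIdx?.go]

-- ===== VERDICT (by name: the statement is the Claim_ definition above) =====
theorem check_neighbor_spec : Claim_unchanged_check_neighbor := by
  intro array x y tile _ pre hnD
  obtain ⟨p1, p2, p3, p4, p5, p6, p7⟩ := pre
  have e1 := pyGet?_eq_some_getD array (x+1) [] p1
  have e2 := pyGet?_eq_some_getD array x [] p2
  have e3 := pyGet?_eq_some_getD array (x-1) [] p3
  have f1 := pyGet?_eq_some_getD (PySem.List.pyGetD array (x+1) []) y 0 p4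
  have f2 := pyGet?_eq_some_getD (PySem.List.pyGetD array x []) (y+1) 0 p5
  have f3 := pyGet?_eq_some_getD (PySem.List.pyGetD array (x-1) []) y 0 p6
  have f4 := pyGet?_eq_some_getD (PySem.List.pyGetD array x []) (y-1) 0 p7
  unfold check_neighbor check_neighbor_alt
  simp only [e1, e2, e3, Option.bind_some, f1, f2, f3, f4, Option.map_some, Option.getD_some]
  exact coreA _ _ _ _ _ hnD

theorem check_neighbor_changed : Claim_changed_check_neighbor := by
  unfold Claim_changed_check_neighbor; decide

theorem check_neighbor_tight : Claim_exact_check_neighbor := by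
  intro array x y tile _ pre hD
  obtain ⟨p1, p2, p3, p4, p5, p6, p7⟩ := pre
  have e1 := pyGet?_eq_some_getD array (x+1) [] p1
  have e2 := pyGet?_eq_some_getD array x [] p2
  have e3 := pyGet?_eq_some_getD array (x-1) [] p3
  have f1 := pyGet?_eq_some_getD (PySem.List.pyGetD array (x+1) []) y 0 p4
  have f2 := pyGet?_eq_some_getD (PySem.List.pyGetD array x []) (y+1) 0 p5
  have f3 := pyGet?_eq_some_getD (PySem.List.pyGetD array (x-1) []) y 0 p6
  have f4 := pyGet?_eq_some_getD (PySem.List.pyGetD array x []) (y-1) 0 p7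
  unfold check_neighbor check_neighbor_alt
  simp only [e1, e2, e3, Option.bind_some, f1, f2, f3, f4, Option.map_some, Option.getD_some]
  exact coreD _ _ _ _ _ hD
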